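-- pv_equiv track=rewrite | github.com/MianJu28/seg-intel | main.py | extract_music
-- ===== SOURCE A (Python) =====
-- def extract_music(segmentation, segment_thres = 60, segment_thres_final = 90,
--                   segment_connect = 5, start_padding = 1, end_padding = 2):
--     r = []
--     #bridges noEnergy segments that are likely fragmented
--     for i in range(len(segmentation)-2, 0, -1):
--         if segmentation[i][0] == 'noEnergy' and segmentation[i][2] - segmentation[i][1] < 2 and \
--         segmentation[i-1][0] == segmentation[i+1][0]:
--             segmentation[i-1] = (segmentation[i-1][0], segmentation[i-1][1], segmentation[i+1][2])
--     for i in segmentation: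
--         if i[0] == 'music' and i[2]-i[1] > segment_thres: r.append(['',i[1] - start_padding, i[2] + end_padding])
--     for i in range(len(r)-1, 0, -1):
--         if r[i][1] - r[i-1][2] < segment_connect:
--             r[i-1][2] = r[i][2]
--             r[i][1] = r[i][2] + 1
--     rf = []
--     for i in r:
--         if i[2]-i[1] > segment_thres_final: rf.append(i)
--     return [['{}:{}:{}'.format(str(int(x[1]//3600)),
--                                str(int(x[1] % 3600 //60)),
--                                str(int(x[1] % 60)).zfill(2)),
--              '{}:{}:{}'.format(str(int(x[2]//3600)),
--                                str(int(x[2]  % 3600  //60)),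
--                                str(int(x[2] % 60)).zfill(2))] for x in rf]
-- ===== SOURCE B (Python) =====
-- def _hms(t):
--     return '{}:{}:{}'.format(str(int(t // 3600)),
--                              str(int(t % 3600 // 60)),
--                              str(int(t % 60)).zfill(2))
--
--
-- def extract_music(segmentation, segment_thres=60, segment_thres_final=90,
--                   segment_connect=5, start_padding=1, end_padding=2):
--     # bridging pass kept identical to A (including the in-place mutation of `segmentation`)
--     for i in range(len(segmentation) - 2, 0, -1):
--         if segmentation[i][0] == 'noEnergy' and segmentation[i][2] - segmentation[i][1] < 2 and \
--            segmentation[i - 1][0] == segmentation[i + 1][0]: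
--             segmentation[i - 1] = (segmentation[i - 1][0], segmentation[i - 1][1], segmentation[i + 1][2])
--     # one forward pass: filter music candidates and merge close neighbours on the fly
--     merged = []
--     for seg in segmentation:
--         if seg[0] == 'music' and seg[2] - seg[1] > segment_thres:
--             s, e = seg[1] - start_padding, seg[2] + end_padding
--             if merged and s - merged[-1][1] < segment_connect:
--                 merged[-1][1] = e
--             else:
--                 merged.append([s, e])
--     return [[_hms(s), _hms(e)] for s, e in merged if e - s > segment_thres_final]
-- ===== Notes on version B (the rewrite author's own statement) =====
-- stated objective: simpler
-- what changed: A's four passes over the candidate list (append-filter pass, backward in-place merge that marks absorbed segments dead by setting start=end+1, final length filter, format comprehension) are replaced by one forward accumulator pass that filters music candidates and merges close neighbours on the fly, followed by a single filter-and-format comprehension; the bridging pass and its in-place mutation of `segmentation` are kept identical.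
-- intended difference: When segment_thres_final < -1 and two adjacent (bridged, padded) music candidates are closer than segment_connect, A's final filter also keeps the dead marker rows [end+1, end] left over from merging (each formatted as a degenerate start>end interval), while B returns only the merged intervals, which is what the final length filter is evidently meant to keep. — e.g. on extract_music([("music", 0, 10), ("music", 12, 25)], 5, -2, 5, 0, 0): A returns [["0:0:00", "0:0:25"], ["0:0:26", "0:0:25"]], B returns [["0:0:00", "0:0:25"]]
import Mathlib
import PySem

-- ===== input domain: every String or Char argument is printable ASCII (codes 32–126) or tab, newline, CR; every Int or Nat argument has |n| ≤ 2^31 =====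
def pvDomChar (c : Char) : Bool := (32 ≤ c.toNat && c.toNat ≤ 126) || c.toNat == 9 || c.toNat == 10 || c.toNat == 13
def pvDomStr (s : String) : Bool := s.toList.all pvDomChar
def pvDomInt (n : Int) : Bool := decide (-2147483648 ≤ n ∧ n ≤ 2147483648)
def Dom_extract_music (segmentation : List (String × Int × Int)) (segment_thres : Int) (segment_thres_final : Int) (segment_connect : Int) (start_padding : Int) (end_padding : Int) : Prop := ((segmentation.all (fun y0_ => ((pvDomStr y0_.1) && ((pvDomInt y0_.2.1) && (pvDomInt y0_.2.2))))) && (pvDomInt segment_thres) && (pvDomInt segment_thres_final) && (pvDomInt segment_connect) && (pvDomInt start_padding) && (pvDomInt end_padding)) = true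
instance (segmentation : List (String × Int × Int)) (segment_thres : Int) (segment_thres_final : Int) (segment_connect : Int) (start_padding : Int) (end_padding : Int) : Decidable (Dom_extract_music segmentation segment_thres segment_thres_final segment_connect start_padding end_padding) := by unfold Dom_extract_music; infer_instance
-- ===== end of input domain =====

-- B replaces A's backward in-place merge pass (plus separate candidate and dead-segment passes)
-- by one forward accumulator pass; return values agree except when segment_thres_final < -1 (see D_).
-- Both A and B mutate `segmentation` in place in the bridging pass, identically; the claims are about the return value.

-- ===== PORT A =====
-- '{}:{}:{}'.format(str(int(t//3600)), str(int(t%3600//60)), str(int(t%60)).zfill(2)) — shared by both ports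
def pvHms (t : Int) : String :=
  PySem.Str.join ":" [PySem.Int.toStr (PySem.Int.floordiv t 3600),
                      PySem.Int.toStr (PySem.Int.floordiv (PySem.Int.mod t 3600) 60),
                      PySem.Str.zfill (PySem.Int.toStr (PySem.Int.mod t 60)) 2]

-- body of the bridging loop (identical in A and in B); all indices 1 ≤ i ≤ len-2 are in range,
-- so the total pyGetD/pySetD forms are exact
def pvBridgeStep (segs : List (String × Int × Int)) (i : Int) : List (String × Int × Int) :=
  let si := PySem.List.pyGetD segs i ("", 0, 0)
  let sm := PySem.List.pyGetD segs (i - 1) ("", 0, 0)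
  let sp := PySem.List.pyGetD segs (i + 1) ("", 0, 0)
  if si.1 == "noEnergy" && decide (si.2.2 - si.2.1 < 2) && (sm.1 == sp.1)
  then PySem.List.pySetD segs (i - 1) (sm.1, sm.2.1, sp.2.2) else segs

-- the bridging pass: for i in range(len(segmentation)-2, 0, -1): … (identical in A and in B)
def pvBridged (segmentation : List (String × Int × Int)) : List (String × Int × Int) :=
  (PySem.List.pyRange ((segmentation.length : Int) - 2) 0 (-1)).foldl pvBridgeStep segmentation

-- body of A's backward merge loop; 1 ≤ i ≤ len-1 is always in range, so the total forms are exact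
def pvAStep (c : Int) (r : List (String × Int × Int)) (i : Int) : List (String × Int × Int) :=
  let ri := PySem.List.pyGetD r i ("", 0, 0)
  let rm := PySem.List.pyGetD r (i - 1) ("", 0, 0)
  if ri.2.1 - rm.2.2 < c then
    let r1 := PySem.List.pySetD r (i - 1) (rm.1, rm.2.1, ri.2.2)
    let ri1 := PySem.List.pyGetD r1 i ("", 0, 0)
    PySem.List.pySetD r1 i (ri1.1, ri1.2.2 + 1, ri1.2.2)
  else r

def extract_music (segmentation : List (String × Int × Int)) (segment_thres : Int) (segment_thres_final : Int) (segment_connect : Int) (start_padding : Int) (end_padding : Int) : List (List String) :=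
  let segs := pvBridged segmentation
  let r := segs.foldl (fun acc t =>
      if t.1 == "music" && decide (t.2.2 - t.2.1 > segment_thres)
      then acc ++ [(("" : String), t.2.1 - start_padding, t.2.2 + end_padding)] else acc)
    ([] : List (String × Int × Int))
  let r2 := (PySem.List.pyRange ((r.length : Int) - 1) 0 (-1)).foldl (pvAStep segment_connect) r
  let rf := r2.foldl (fun acc t =>
      if decide (t.2.2 - t.2.1 > segment_thres_final) then acc ++ [t] else acc)
    ([] : List (String × Int × Int))
  rf.map (fun x => [pvHms x.2.1, pvHms x.2.2])

-- ===== PORT B =====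
-- body of B's forward merge: 'if merged and s - merged[-1][1] < segment_connect: merged[-1][1] = e else: merged.append([s, e])'
def pvCoreB (c : Int) (merged : List (Int × Int)) (se : Int × Int) : List (Int × Int) :=
  if !merged.isEmpty && decide (se.1 - (PySem.List.pyGetD merged (-1) (0, 0)).2 < c)
  then PySem.List.pySetD merged (-1) ((PySem.List.pyGetD merged (-1) (0, 0)).1, se.2)
  else merged ++ [se]

def extract_music_alt (segmentation : List (String × Int × Int)) (segment_thres : Int) (segment_thres_final : Int) (segment_connect : Int) (start_padding : Int) (end_padding : Int) : List (List String) :=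
  let segs := pvBridged segmentation
  let merged := segs.foldl (fun merged seg =>
      if seg.1 == "music" && decide (seg.2.2 - seg.2.1 > segment_thres)
      then pvCoreB segment_connect merged (seg.2.1 - start_padding, seg.2.2 + end_padding)
      else merged) ([] : List (Int × Int))
  (merged.filter (fun p => decide (p.2 - p.1 > segment_thres_final))).map
    (fun p => [pvHms p.1, pvHms p.2])

-- ===== PRECONDITION & SPEC =====
-- the padded 'music' candidates of the bridged list (used only to state D_)
def pvCands (segs : List (String × Int × Int)) (st sp ep : Int) : List (Int × Int) :=
  (segs.filter (fun t => t.1 == "music" && decide (t.2.2 - t.2.1 > st))).map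
    (fun t => (t.2.1 - sp, t.2.2 + ep))

-- some adjacent candidate pair is closer than c (so A's merge pass fires at least once)
def pvHasGap (c : Int) : List (Int × Int) → Bool
  | p :: q :: t => decide (q.1 - p.2 < c) || pvHasGap c (q :: t)
  | _ => false

-- When segment_thres_final < -1 and the merge pass fires, A's final filter keeps the emptied-out
-- leftover segments [end+1, end] of each merged group (an artefact of marking them dead in place)
-- and A returns extra degenerate "[end+1, end]" rows; B returns only the merged segments, which is
-- what the final length filter is evidently meant to keep.
def D_extract_music (segmentation : List (String × Int × Int)) (segment_thres : Int) (segment_thres_final : Int) (segment_connect : Int) (start_padding : Int) (end_padding : Int) : Prop :=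
  segment_thres_final < -1 ∧
  pvHasGap segment_connect (pvCands (pvBridged segmentation) segment_thres start_padding end_padding) = true
instance (segmentation : List (String × Int × Int)) (segment_thres : Int) (segment_thres_final : Int) (segment_connect : Int) (start_padding : Int) (end_padding : Int) : Decidable (D_extract_music segmentation segment_thres segment_thres_final segment_connect start_padding end_padding) := by unfold D_extract_music; infer_instance

def Spec_extract_music (segmentation : List (String × Int × Int)) (segment_thres : Int) (segment_thres_final : Int) (segment_connect : Int) (start_padding : Int) (end_padding : Int) (out : List (List String)) : Prop := ¬ D_extract_music segmentation segment_thres segment_thres_final segment_connect start_padding end_padding → out = extract_music_alt segmentation segment_thres segment_thres_final segment_connect start_padding end_padding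
instance (segmentation : List (String × Int × Int)) (segment_thres : Int) (segment_thres_final : Int) (segment_connect : Int) (start_padding : Int) (end_padding : Int) (out : List (List String)) : Decidable (Spec_extract_music segmentation segment_thres segment_thres_final segment_connect start_padding end_padding out) := by unfold Spec_extract_music; infer_instance

def pvDiffWitness_extract_music : (List (String × Int × Int)) × Int × Int × Int × Int × Int :=
  ([("music", 0, 10), ("music", 12, 25)], 5, -2, 5, 0, 0)
def pvDiffWitnessOut_extract_music : (List (List String)) × (List (List String)) :=
  ([["0:0:00", "0:0:25"], ["0:0:26", "0:0:25"]], [["0:0:00", "0:0:25"]])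

-- ===== CLAIM =====
def Claim_unchanged_extract_music : Prop := ∀ (segmentation : List (String × Int × Int)) (segment_thres : Int) (segment_thres_final : Int) (segment_connect : Int) (start_padding : Int) (end_padding : Int), Dom_extract_music segmentation segment_thres segment_thres_final segment_connect start_padding end_padding → Spec_extract_music segmentation segment_thres segment_thres_final segment_connect start_padding end_padding (extract_music segmentation segment_thres segment_thres_final segment_connect start_padding end_padding)
def Claim_changed_extract_music : Prop := Dom_extract_music (pvDiffWitness_extract_music.1) (pvDiffWitness_extract_music.2.1) (pvDiffWitness_extract_music.2.2.1) (pvDiffWitness_extract_music.2.2.2.1) (pvDiffWitness_extract_music.2.2.2.2.1) (pvDiffWitness_extract_music.2.2.2.2.2) ∧ D_extract_music (pvDiffWitness_extract_music.1) (pvDiffWitness_extract_music.2.1) (pvDiffWitness_extract_music.2.2.1) (pvDiffWitness_extract_music.2.2.2.1) (pvDiffWitness_extract_music.2.2.2.2.1) (pvDiffWitness_extract_music.2.2.2.2.2) ∧ extract_music (pvDiffWitness_extract_music.1) (pvDiffWitness_extract_music.2.1) (pvDiffWitness_extract_music.2.2.1) (pvDiffWitness_extract_music.2.2.2.1) (pvDiffWitness_extract_music.2.2.2.2.1)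 (pvDiffWitness_extract_music.2.2.2.2.2) = pvDiffWitnessOut_extract_music.1 ∧ extract_music_alt (pvDiffWitness_extract_music.1) (pvDiffWitness_extract_music.2.1) (pvDiffWitness_extract_music.2.2.1) (pvDiffWitness_extract_music.2.2.2.1) (pvDiffWitness_extract_music.2.2.2.2.1) (pvDiffWitness_extract_music.2.2.2.2.2) = pvDiffWitnessOut_extract_music.2 ∧ pvDiffWitnessOut_extract_music.1 ≠ pvDiffWitnessOut_extract_music.2
def Claim_exact_extract_music : Prop := ∀ (segmentation : List (String × Int × Int)) (segment_thres : Int) (segment_thres_final : Int) (segment_connect : Int) (start_padding : Int) (end_padding : Int), Dom_extract_music segmentation segment_thres segment_thres_final segment_connect start_padding end_padding → D_extract_music segmentation segment_thres segment_thres_final segment_connect start_padding end_padding → extract_music segmentation segment_thres segment_thres_final segment_connect start_padding end_padding ≠ extract_music_alt segmentation segment_thres segment_thres_final segment_connect start_padding end_padding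

-- ===== LEMMAS AND PROOFS =====

-- pure recursion computing A's backward merge loop (heads keep their start, merged-away
-- segments become (label, E+1, E) for the chain end E)
def pvMergeRec (c : Int) : List (String × Int × Int) → List (String × Int × Int)
  | [] => []
  | [x] => [x]
  | x :: y :: t =>
    match pvMergeRec c (y :: t) with
    | [] => [x]
    | h :: rest =>
      if y.2.1 - x.2.2 < c then (x.1, x.2.1, h.2.2) :: (h.1, h.2.2 + 1, h.2.2) :: rest
      else x :: h :: rest

-- the same recursion on bare (start, end) pairs
def pvPexp (c : Int) : List (Int × Int) → List (Int × Int)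
  | [] => []
  | [p] => [p]
  | p :: q :: t =>
    match pvPexp c (q :: t) with
    | [] => [p]
    | h :: rest =>
      if q.1 - p.2 < c then (p.1, h.2) :: (h.2 + 1, h.2) :: rest
      else p :: h :: rest

-- split off the first merge chain: final end of the chain whose running end is e, and the rest
def pvSplit (c : Int) (e : Int) : List (Int × Int) → Int × List (Int × Int)
  | [] => (e, [])
  | q :: t => if q.1 - e < c then pvSplit c q.2 t else (e, q :: t)

-- B's forward grouping, as a recursion: current group started at s with running end e
def pvGo (c : Int) (s e : Int) : List (Int × Int) → List (Int × Int)
  | [] => [(s, e)]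
  | q :: t => if q.1 - e < c then pvGo c s q.2 t else (s, e) :: pvGo c q.1 q.2 t

def pvGroups (c : Int) : List (Int × Int) → List (Int × Int)
  | [] => []
  | q :: t => pvGo c q.1 q.2 t

theorem pv_getD_shift {α : Type} (i : Int) (x : α) (w : List α) (d : α) (h : 1 ≤ i) :
    PySem.List.pyGetD (x :: w) i d = PySem.List.pyGetD w (i - 1) d := by
  obtain ⟨k, hk⟩ : ∃ k : Nat, i = ((k : Int) + 1) := ⟨(i - 1).toNat, by omega⟩
  subst hk
  rw [show ((k : Int) + 1) = ((k + 1 : Nat) : Int) from by push_cast; ring,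
      PySem.List.pyGetD_natCast,
      show ((k + 1 : Nat) : Int) - 1 = ((k : Nat) : Int) from by push_cast; ring,
      PySem.List.pyGetD_natCast]
  simp

theorem pv_setD_shift {α : Type} (i : Int) (x v : α) (w : List α) (h : 1 ≤ i) :
    PySem.List.pySetD (x :: w) i v = x :: PySem.List.pySetD w (i - 1) v := by
  obtain ⟨k, hk⟩ : ∃ k : Nat, i = ((k : Int) + 1) := ⟨(i - 1).toNat, by omega⟩
  subst hk
  rw [show ((k : Int) + 1) = ((k + 1 : Nat) : Int) from by push_cast; ring,
      PySem.List.pySetD_natCast,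
      show ((k + 1 : Nat) : Int) - 1 = ((k : Nat) : Int) from by push_cast; ring,
      PySem.List.pySetD_natCast]
  simp

theorem pv_step_shift (c i : Int) (x : String × Int × Int) (w : List (String × Int × Int)) (h : 2 ≤ i) :
    pvAStep c (x :: w) i = x :: pvAStep c w (i - 1) := by
  simp only [pvAStep]
  rw [pv_getD_shift i x w _ (by omega), pv_getD_shift (i - 1) x w _ (by omega),
      pv_setD_shift (i - 1) x _ w (by omega), pv_getD_shift i x _ _ (by omega),
      pv_setD_shift i x _ _ (by omega)]
  split <;> rfl

theorem pv_fold_shift (c : Int) : ∀ (n : Nat) (a : Int), a ≤ n →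
    ∀ (x : String × Int × Int) (w : List (String × Int × Int)),
    (PySem.List.pyRange a 1 (-1)).foldl (pvAStep c) (x :: w)
      = x :: (PySem.List.pyRange (a - 1) 0 (-1)).foldl (pvAStep c) w := by
  intro n
  induction n with
  | zero =>
    intro a ha x w
    rw [PySem.List.pyRange_neg_one_eq_nil (by omega), PySem.List.pyRange_neg_one_eq_nil (by omega)]
    rfl
  | succ m ih =>
    intro a ha x w
    by_cases h1 : a ≤ 1
    · rw [PySem.List.pyRange_neg_one_eq_nil (by omega), PySem.List.pyRange_neg_one_eq_nil (by omega)]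
      rfl
    · rw [PySem.List.pyRange_neg_one_cons (by omega : (1 : Int) < a),
          PySem.List.pyRange_neg_one_cons (by omega : (0 : Int) < a - 1)]
      simp only [List.foldl_cons]
      rw [pv_step_shift c a x w (by omega)]
      exact ih (a - 1) (by omega) x (pvAStep c w (a - 1))

theorem pv_mergeRec_cons (c : Int) : ∀ (t : List (String × Int × Int)) (y : String × Int × Int),
    ∃ E rest, pvMergeRec c (y :: t) = (y.1, y.2.1, E) :: rest := by
  intro t
  induction t with
  | nil => exact fun y => ⟨y.2.2, [], rfl⟩
  | cons z t ih =>
    intro y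
    obtain ⟨E, rest, hE⟩ := ih z
    simp only [pvMergeRec, hE]
    by_cases hc : z.2.1 - y.2.2 < c
    · exact ⟨E, _, by rw [if_pos hc]⟩
    · exact ⟨y.2.2, _, by rw [if_neg hc]⟩

theorem pv_step_one (c : Int) (x h : String × Int × Int) (rest : List (String × Int × Int)) :
    pvAStep c (x :: h :: rest) 1
      = if h.2.1 - x.2.2 < c then (x.1, x.2.1, h.2.2) :: (h.1, h.2.2 + 1, h.2.2) :: rest
        else x :: h :: rest := by
  have h0 : (0 : Int) ≤ (rest.length : Int) + 1 := by omega
  have h1 : 1 < rest.length + 1 + 1 := by omega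
  simp [pvAStep, PySem.List.pyGetD, PySem.List.pyGet?, PySem.List.pyIdx?,
        PySem.List.pySetD, PySem.List.pySet?, h0, h1]

theorem pv_loopA (c : Int) : ∀ (n : Nat) (r : List (String × Int × Int)), r.length ≤ n →
    (PySem.List.pyRange ((r.length : Int) - 1) 0 (-1)).foldl (pvAStep c) r = pvMergeRec c r := by
  intro n
  induction n with
  | zero =>
    intro r hr
    have : r = [] := List.length_eq_zero_iff.mp (by omega)
    subst this
    rw [PySem.List.pyRange_neg_one_eq_nil (by simp)]
    rfl
  | succ m ih =>
    intro r hr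
    match r with
    | [] =>
      rw [PySem.List.pyRange_neg_one_eq_nil (by simp)]
      rfl
    | [x] =>
      rw [PySem.List.pyRange_neg_one_eq_nil (by simp)]
      rfl
    | x :: y :: t =>
      have hlen : ((x :: y :: t).length : Int) = (t.length : Int) + 2 := by simp; ring
      have hsplit : PySem.List.pyRange (((x :: y :: t).length : Int) - 1) 0 (-1)
          = PySem.List.pyRange (((x :: y :: t).length : Int) - 1) 1 (-1) ++ [1] := by
        rw [PySem.List.pyRange_neg_one_eq_reverse, PySem.List.pyRange_one_cons (by omega),
            List.reverse_cons, PySem.List.pyRange_neg_one_eq_reverse]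
        norm_num
      rw [hsplit, List.foldl_append,
          pv_fold_shift c (t.length + 1) (((x :: y :: t).length : Int) - 1) (by push_cast [List.length_cons]; omega) x (y :: t),
          show (((x :: y :: t).length : Int) - 1) - 1 = ((y :: t).length : Int) - 1 from by push_cast [List.length_cons]; omega,
          ih (y :: t) (by simp at hr ⊢; omega)]
      obtain ⟨E, rest, hE⟩ := pv_mergeRec_cons c t y
      rw [hE]
      simp only [List.foldl_cons, List.foldl_nil]
      rw [pv_step_one]
      simp only [pvMergeRec, hE]

theorem pv_split_len (c : Int) : ∀ (t : List (Int × Int)) (e : Int),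
    (pvSplit c e t).2.length ≤ t.length := by
  intro t
  induction t with
  | nil => intro e; simp [pvSplit]
  | cons q t ih =>
    intro e
    simp only [pvSplit]
    split
    · exact le_trans (ih q.2) (by simp)
    · simp

theorem pv_pexp_split (c : Int) : ∀ (t : List (Int × Int)) (p : Int × Int),
    pvPexp c (p :: t) = (p.1, (pvSplit c p.2 t).1)
      :: (List.replicate (t.length - (pvSplit c p.2 t).2.length)
            ((pvSplit c p.2 t).1 + 1, (pvSplit c p.2 t).1)
          ++ pvPexp c (pvSplit c p.2 t).2) := by
  intro t
  induction t with
  | nil => intro p; simp [pvPexp, pvSplit]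
  | cons q t ih =>
    intro p
    by_cases hc : q.1 - p.2 < c
    · have hr := pv_split_len c t q.2
      simp only [pvPexp, ih q, if_pos hc, pvSplit]
      rw [show (q :: t).length - (pvSplit c q.2 t).2.length
            = (t.length - (pvSplit c q.2 t).2.length) + 1 from by simp; omega,
          List.replicate_succ]
      simp only [List.cons_append]
    · simp only [pvPexp, ih q, if_neg hc, pvSplit]
      simp only [Nat.sub_self, List.replicate_zero, List.nil_append]

theorem pv_go_split (c : Int) : ∀ (t : List (Int × Int)) (s e : Int),
    pvGo c s e t = (s, (pvSplit c e t).1) :: pvGroups c (pvSplit c e t).2 := by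
  intro t
  induction t with
  | nil => intro s e; simp [pvGo, pvSplit, pvGroups]
  | cons q t ih =>
    intro s e
    by_cases hc : q.1 - e < c
    · simp only [pvGo, pvSplit, if_pos hc]
      exact ih s q.2
    · simp only [pvGo, pvSplit, if_neg hc, pvGroups]

theorem pv_pexp_cons (c : Int) (t : List (Int × Int)) (p : Int × Int) :
    ∃ E rest, pvPexp c (p :: t) = (p.1, E) :: rest :=
  ⟨(pvSplit c p.2 t).1, _, pv_pexp_split c t p⟩

theorem pv_mergeRec_map (c : Int) : ∀ (l : List (Int × Int)),
    pvMergeRec c (l.map (fun p => (("" : String), p.1, p.2)))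
      = (pvPexp c l).map (fun p => (("" : String), p.1, p.2)) := by
  intro l
  induction l with
  | nil => rfl
  | cons p l ih =>
    match l with
    | [] => rfl
    | q :: t =>
      obtain ⟨E, rest, hE⟩ := pv_pexp_cons c t q
      rw [hE] at ih
      simp only [List.map_cons] at ih ⊢
      simp only [pvMergeRec, pvPexp, ih, hE]
      by_cases hc : q.1 - p.2 < c
      · rw [if_pos hc, if_pos hc]
        rfl
      · rw [if_neg hc, if_neg hc]
        rfl

theorem pv_filter_eq_of_ge (c tf : Int) (htf : ¬ tf < -1) : ∀ (n : Nat) (l : List (Int × Int)), l.length ≤ n →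
    (pvPexp c l).filter (fun p => decide (p.2 - p.1 > tf))
      = (pvGroups c l).filter (fun p => decide (p.2 - p.1 > tf)) := by
  intro n
  induction n with
  | zero =>
    intro l hl
    have : l = [] := List.length_eq_zero_iff.mp (by omega)
    subst this
    rfl
  | succ m ih =>
    intro l hl
    match l with
    | [] => rfl
    | p :: t =>
      have hr := pv_split_len c t p.2
      rw [pv_pexp_split c t p, show pvGroups c (p :: t) = pvGo c p.1 p.2 t from rfl,
          pv_go_split c t p.1 p.2]
      simp only [List.filter_cons, List.filter_append, List.filter_replicate]
      rw [show (decide ((pvSplit c p.2 t).1 - ((pvSplit c p.2 t).1 + 1) > tf)) = false from by simp; omega]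
      simp only [Bool.false_eq_true, if_false, List.nil_append]
      rw [ih (pvSplit c p.2 t).2 (by simp at hl; omega)]

theorem pv_pexp_eq_groups_of_nogap (c : Int) : ∀ (l : List (Int × Int)),
    pvHasGap c l = false → pvPexp c l = pvGroups c l := by
  intro l
  induction l with
  | nil => intro _; rfl
  | cons p l ih =>
    intro h
    match l with
    | [] => rfl
    | q :: t =>
      simp only [pvHasGap, Bool.or_eq_false_iff, decide_eq_false_iff_not] at h
      obtain ⟨hc, hg⟩ := h
      obtain ⟨E, rest, hE⟩ := pv_pexp_cons c t q
      have ihq := ih hg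
      simp only [pvPexp, hE, if_neg hc]
      rw [← hE, ihq]
      show p :: pvGroups c (q :: t) = pvGroups c (p :: q :: t)
      simp only [pvGroups, pvGo, if_neg hc]

theorem pv_gap_split (c : Int) : ∀ (t : List (Int × Int)) (p : Int × Int),
    pvHasGap c (p :: t) = true →
    (pvSplit c p.2 t).2.length < t.length ∨ pvHasGap c (pvSplit c p.2 t).2 = true := by
  intro t p h
  match t with
  | [] => simp [pvHasGap] at h
  | q :: t' =>
    by_cases hc : q.1 - p.2 < c
    · left
      have := pv_split_len c t' q.2
      simp only [pvSplit, if_pos hc]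
      simp
      omega
    · right
      simp only [pvHasGap, Bool.or_eq_true, decide_eq_true_eq] at h
      rcases h with h | h
      · exact absurd h hc
      · simp only [pvSplit, if_neg hc]
        exact h

theorem pv_len_ge (c tf : Int) (htf : tf < -1) : ∀ (n : Nat) (l : List (Int × Int)), l.length ≤ n →
    ((pvGroups c l).filter (fun p => decide (p.2 - p.1 > tf))).length
      ≤ ((pvPexp c l).filter (fun p => decide (p.2 - p.1 > tf))).length := by
  intro n
  induction n with
  | zero =>
    intro l hl
    have : l = [] := List.length_eq_zero_iff.mp (by omega)
    subst this
    simp [pvPexp, pvGroups]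
  | succ m ih =>
    intro l hl
    match l with
    | [] => simp [pvPexp, pvGroups]
    | p :: t =>
      have hr := pv_split_len c t p.2
      rw [pv_pexp_split c t p, show pvGroups c (p :: t) = pvGo c p.1 p.2 t from rfl,
          pv_go_split c t p.1 p.2]
      simp only [List.filter_cons, List.filter_append, List.filter_replicate]
      have hihr := ih (pvSplit c p.2 t).2 (by simp at hl; omega)
      simp only [gt_iff_lt] at hihr ⊢
      split <;> simp [htf] <;> omega

theorem pv_len_gt (c tf : Int) (htf : tf < -1) : ∀ (n : Nat) (l : List (Int × Int)), l.length ≤ n →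
    pvHasGap c l = true →
    ((pvGroups c l).filter (fun p => decide (p.2 - p.1 > tf))).length
      < ((pvPexp c l).filter (fun p => decide (p.2 - p.1 > tf))).length := by
  intro n
  induction n with
  | zero =>
    intro l hl hg
    have : l = [] := List.length_eq_zero_iff.mp (by omega)
    subst this
    simp [pvHasGap] at hg
  | succ m ih =>
    intro l hl hg
    match l with
    | [] => simp [pvHasGap] at hg
    | p :: t =>
      have hr := pv_split_len c t p.2
      have hmark : (decide ((pvSplit c p.2 t).1 - ((pvSplit c p.2 t).1 + 1) > tf)) = true := by
        simp
        omega
      rw [pv_pexp_split c t p, show pvGroups c (p :: t) = pvGo c p.1 p.2 t from rfl,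
          pv_go_split c t p.1 p.2]
      simp only [List.filter_cons, List.filter_append, List.filter_replicate, hmark, if_true]
      rcases pv_gap_split c t p hg with hlt | hgr
      · have hihr := pv_len_ge c tf htf (pvSplit c p.2 t).2.length (pvSplit c p.2 t).2 le_rfl
        simp only [gt_iff_lt] at hihr ⊢
        split <;> simp <;> omega
      · have hihr := ih (pvSplit c p.2 t).2 (by simp at hl; omega) hgr
        simp only [gt_iff_lt] at hihr ⊢
        split <;> simp <;> omega

theorem pv_setD_append_singleton {α : Type} (xs : List α) (x v : α) :
    PySem.List.pySetD (xs ++ [x]) (-1) v = xs ++ [v] := by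
  simp [PySem.List.pySetD, PySem.List.pySet?, PySem.List.pyIdx?]

theorem pv_foldB_go (c : Int) : ∀ (t : List (Int × Int)) (acc : List (Int × Int)) (s g : Int),
    t.foldl (pvCoreB c) (acc ++ [(s, g)]) = acc ++ pvGo c s g t := by
  intro t
  induction t with
  | nil => intro acc s g; rfl
  | cons q t ih =>
    intro acc s g
    simp only [List.foldl_cons]
    have hne : ((acc ++ [(s, g)]).isEmpty : Bool) = false := by simp
    by_cases hc : q.1 - g < c
    · have hstep : pvCoreB c (acc ++ [(s, g)]) q = acc ++ [(s, q.2)] := by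
        simp only [pvCoreB, hne, PySem.List.pyGetD_neg_one_append_singleton]
        rw [if_pos (by simp [hc]), pv_setD_append_singleton]
      rw [hstep, ih acc s q.2]
      simp only [pvGo, if_pos hc]
    · have hstep : pvCoreB c (acc ++ [(s, g)]) q = (acc ++ [(s, g)]) ++ [(q.1, q.2)] := by
        simp only [pvCoreB, hne, PySem.List.pyGetD_neg_one_append_singleton]
        rw [if_neg (by simp [hc])]
      rw [hstep, ih (acc ++ [(s, g)]) q.1 q.2]
      simp only [pvGo, if_neg hc, List.append_assoc, List.singleton_append]

theorem pv_foldB (c : Int) : ∀ (l : List (Int × Int)),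
    l.foldl (pvCoreB c) [] = pvGroups c l := by
  intro l
  match l with
  | [] => rfl
  | p :: t =>
    simp only [List.foldl_cons]
    have hstep : pvCoreB c [] p = [] ++ [(p.1, p.2)] := by
      simp [pvCoreB]
    rw [hstep, pv_foldB_go c t [] p.1 p.2]
    rfl

theorem pv_foldB_guard (c st sp ep : Int) : ∀ (segs : List (String × Int × Int)) (m : List (Int × Int)),
    segs.foldl (fun merged seg =>
      if seg.1 == "music" && decide (seg.2.2 - seg.2.1 > st)
      then pvCoreB c merged (seg.2.1 - sp, seg.2.2 + ep) else merged) m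
    = (pvCands segs st sp ep).foldl (pvCoreB c) m := by
  intro segs
  induction segs with
  | nil => intro m; rfl
  | cons t segs ih =>
    intro m
    simp only [List.foldl_cons, pvCands, List.filter_cons]
    by_cases hg : (t.1 == "music" && decide (t.2.2 - t.2.1 > st)) = true
    · rw [if_pos hg, hg]
      exact ih _
    · rw [if_neg hg, Bool.not_eq_true] at *
      rw [hg]
      simp only [Bool.false_eq_true, if_false]
      exact ih m

theorem pv_A_closed (segmentation : List (String × Int × Int)) (st tf c sp ep : Int) :
    extract_music segmentation st tf c sp ep
      = ((pvPexp c (pvCands (pvBridged segmentation) st sp ep)).filter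
          (fun p => decide (p.2 - p.1 > tf))).map (fun p => [pvHms p.1, pvHms p.2]) := by
  simp only [extract_music]
  rw [PySem.List.foldl_append_if (fun t : String × Int × Int => t.1 == "music" && decide (t.2.2 - t.2.1 > st))
        (fun t : String × Int × Int => (("" : String), t.2.1 - sp, t.2.2 + ep)),
      List.nil_append]
  have hmap : ((pvBridged segmentation).filter
        (fun t => t.1 == "music" && decide (t.2.2 - t.2.1 > st))).map
        (fun t : String × Int × Int => (("" : String), t.2.1 - sp, t.2.2 + ep))
      = (pvCands (pvBridged segmentation) st sp ep).map (fun p => (("" : String), p.1, p.2)) := by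
    simp [pvCands, List.map_map]
  rw [hmap, pv_loopA c _ _ le_rfl, pv_mergeRec_map c,
      PySem.List.foldl_append_if_eq_filter, List.nil_append, List.filter_map, List.map_map]
  rfl

theorem pv_B_closed (segmentation : List (String × Int × Int)) (st tf c sp ep : Int) :
    extract_music_alt segmentation st tf c sp ep
      = ((pvGroups c (pvCands (pvBridged segmentation) st sp ep)).filter
          (fun p => decide (p.2 - p.1 > tf))).map (fun p => [pvHms p.1, pvHms p.2]) := by
  simp only [extract_music_alt]
  rw [pv_foldB_guard c st sp ep, pv_foldB c]

-- ===== VERDICT =====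
theorem extract_music_spec : Claim_unchanged_extract_music := by
  intro segmentation st tf c sp ep _ hnd
  rw [pv_A_closed, pv_B_closed]
  unfold D_extract_music at hnd
  push Not at hnd
  by_cases htf : tf < -1
  · have hng := hnd htf
    have hng' : pvHasGap c (pvCands (pvBridged segmentation) st sp ep) = false := by
      simpa using hng
    rw [pv_pexp_eq_groups_of_nogap c _ hng']
  · rw [pv_filter_eq_of_ge c tf htf (pvCands (pvBridged segmentation) st sp ep).length _ le_rfl]

theorem extract_music_changed : Claim_changed_extract_music := by
  unfold Claim_changed_extract_music; decide

theorem extract_music_tight : Claim_exact_extract_music := by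
  intro segmentation st tf c sp ep _ hd heq
  obtain ⟨htf, hgap⟩ := hd
  rw [pv_A_closed, pv_B_closed] at heq
  have := congrArg List.length heq
  simp only [List.length_map] at this
  have hlt := pv_len_gt c tf htf (pvCands (pvBridged segmentation) st sp ep).length _ le_rfl hgap
  omega
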